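-- pv_equiv track=rewrite | github.com/BeyzaOzkara/ArslanProject | StokApp/views.py | duplicate_raw_data
-- ===== SOURCE A (Python) =====
-- import copy
--
-- def duplicate_raw_data(raw_data, num_duplicates):
--     duplicated_data = []
--     for _ in range(num_duplicates):
--         new_data = copy.deepcopy(raw_data)
--         id_offset = max(item['id'] for item in duplicated_data) + 1 if duplicated_data else 1
--         for item in new_data:
--             item['id'] = id_offset
--             id_offset += 1
--         duplicated_data.extend(new_data)
--     return duplicated_data
-- ===== SOURCE B (Python) =====
-- import copy
--
-- def duplicate_raw_data(raw_data, num_duplicates):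
--     duplicated_data = []
--     for _ in range(num_duplicates):
--         duplicated_data.extend(copy.deepcopy(raw_data))
--     for new_id, item in enumerate(duplicated_data, start=1):
--         item['id'] = new_id
--     return duplicated_data
-- ===== Notes on version B (the rewrite author's own statement) =====
-- stated objective: simpler
-- what changed: A interleaves duplication with per-block id assignment, recomputing the current maximum id by a full scan before each block; B first replicates the data k times and then numbers all items 1..k*n in a single enumerate pass, removing the max-scan entirely.
import Mathlib
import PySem

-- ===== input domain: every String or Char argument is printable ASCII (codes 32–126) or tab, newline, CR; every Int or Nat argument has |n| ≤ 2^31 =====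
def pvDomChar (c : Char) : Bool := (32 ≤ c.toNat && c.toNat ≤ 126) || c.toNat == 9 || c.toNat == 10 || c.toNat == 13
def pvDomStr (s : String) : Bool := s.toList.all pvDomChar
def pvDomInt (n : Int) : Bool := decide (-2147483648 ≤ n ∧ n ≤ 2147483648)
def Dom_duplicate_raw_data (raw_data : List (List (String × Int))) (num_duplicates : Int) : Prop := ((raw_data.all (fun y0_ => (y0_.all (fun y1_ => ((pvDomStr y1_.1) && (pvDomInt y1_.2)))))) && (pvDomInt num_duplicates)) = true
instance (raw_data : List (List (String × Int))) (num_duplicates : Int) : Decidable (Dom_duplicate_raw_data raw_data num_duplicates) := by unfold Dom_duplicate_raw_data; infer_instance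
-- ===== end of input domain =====

-- B separates A's interleaved duplicate-and-renumber loop (with a max-scan per block) into two passes:
-- replicate the data k times, then number all items 1..k*n in one enumerate pass (simpler; return value only —
-- both Pythons mutate the copied dicts in place, never the caller's argument).


-- ===== PORT A =====
-- item['id'] = v  (dict assignment: overwrite in place, new key appends)
def pvSetId (d : List (String × Int)) (v : Int) : List (String × Int) :=
  ((PySem.Dict.mk d).insert "id" v).items

-- item['id'] as read by A's max-scan; exact whenever the key is present, which A's
-- invariant guarantees at every point the Python evaluates it (every stored item was assigned an id).
def pvIdOf (d : List (String × Int)) : Int := ((PySem.Dict.mk d).get? "id").getD 0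

-- A's inner loop: for item in new_data: item['id'] = id_offset; id_offset += 1
def pvAssignA : List (List (String × Int)) → Int → List (List (String × Int))
  | [], _ => []
  | d :: rest, off => pvSetId d off :: pvAssignA rest (off + 1)

def duplicate_raw_data (raw_data : List (List (String × Int))) (num_duplicates : Int) : List (List (String × Int)) :=
  (List.range num_duplicates.toNat).foldl
    (fun duplicated_data _ =>
      let id_offset : Int :=
        if duplicated_data.isEmpty then 1
        else ((PySem.List.max? (duplicated_data.map pvIdOf) (fun x => x)).getD 0) + 1
      duplicated_data ++ pvAssignA raw_data id_offset) []

-- ===== PORT B =====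
def duplicate_raw_data_alt (raw_data : List (List (String × Int))) (num_duplicates : Int) : List (List (String × Int)) :=
  let duplicated_data := (List.range num_duplicates.toNat).foldl (fun acc _ => acc ++ raw_data) []
  (PySem.List.enumerate duplicated_data 1).map (fun p => pvSetId p.2 p.1)

-- ===== PRECONDITION & SPEC =====
def Spec_duplicate_raw_data (raw_data : List (List (String × Int))) (num_duplicates : Int) (out : List (List (String × Int))) : Prop := out = duplicate_raw_data_alt raw_data num_duplicates
instance (raw_data : List (List (String × Int))) (num_duplicates : Int) (out : List (List (String × Int))) : Decidable (Spec_duplicate_raw_data raw_data num_duplicates out) := by unfold Spec_duplicate_raw_data; infer_instance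

-- ===== CLAIM (what is proved, stated in full; the proofs are below) =====
def Claim_equal_duplicate_raw_data : Prop := ∀ (raw_data : List (List (String × Int))) (num_duplicates : Int), Dom_duplicate_raw_data raw_data num_duplicates → Spec_duplicate_raw_data raw_data num_duplicates (duplicate_raw_data raw_data num_duplicates)

-- ===== LEMMAS AND PROOFS =====

-- B's numbering pass, parameterised by the start id
def pvNumberFrom (s : Int) (xs : List (List (String × Int))) : List (List (String × Int)) :=
  (PySem.List.enumerate xs s).map (fun p => pvSetId p.2 p.1)

theorem pvAssignA_eq_numberFrom (xs : List (List (String × Int))) (off : Int) :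
    pvAssignA xs off = pvNumberFrom off xs := by
  induction xs generalizing off with
  | nil => simp [pvAssignA, pvNumberFrom, PySem.List.enumerate_nil]
  | cons d rest ih => simp [pvAssignA, pvNumberFrom, PySem.List.enumerate_cons, ih]

theorem pvIdOf_setId (d : List (String × Int)) (v : Int) : pvIdOf (pvSetId d v) = v := by
  unfold pvIdOf pvSetId
  rw [show (PySem.Dict.mk (((PySem.Dict.mk d).insert "id" v).items)) = (PySem.Dict.mk d).insert "id" v from rfl,
    PySem.Dict.get?_insert_self]
  rfl

theorem pvNumberFrom_ids (xs : List (List (String × Int))) (s : Int) :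
    (pvNumberFrom s xs).map pvIdOf = (List.range xs.length).map (fun j : Nat => s + (j : Int)) := by
  induction xs generalizing s with
  | nil => simp [pvNumberFrom, PySem.List.enumerate_nil]
  | cons d rest ih =>
    simp only [pvNumberFrom, PySem.List.enumerate_cons, List.map_cons, pvIdOf_setId,
      List.length_cons, List.range_succ_eq_map, List.map_map]
    congr 1
    · simp
    · rw [show ((fun j : Nat => s + (j : Int)) ∘ Nat.succ) = (fun j : Nat => (s+1) + (j : Int)) from by
        funext j; simp; ring]
      simpa [pvNumberFrom, List.map_map] using ih (s + 1)

theorem pvFoldlMaxRange (n : Nat) (s x : Int) :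
    ((List.range n).map (fun j : Nat => s + (j : Int))).foldl max x
      = if n = 0 then x else max x (s + (n : Int) - 1) := by
  induction n generalizing x with
  | zero => simp
  | succ m ih =>
    rw [List.range_succ, List.map_append, List.foldl_append]
    simp only [List.map_cons, List.map_nil, List.foldl_cons, List.foldl_nil]
    rw [ih]
    rcases Nat.eq_zero_or_pos m with h | h
    · subst h; simp
    · have hm : m ≠ 0 := by omega
      simp only [hm, if_false, Nat.succ_ne_zero, Nat.cast_succ]
      rw [max_assoc]
      congr 1
      have : s + (m : Int) - 1 ≤ s + (m : Int) + 1 - 1 := by omega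
      omega

theorem pvMaxIds (xs : List (List (String × Int))) (h : xs ≠ []) :
    PySem.List.max? ((pvNumberFrom 1 xs).map pvIdOf) (fun y => y) = some (xs.length : Int) := by
  obtain ⟨d, rest, rfl⟩ := List.exists_cons_of_ne_nil h
  rw [pvNumberFrom_ids]
  simp only [List.length_cons, List.range_succ_eq_map, List.map_cons, List.map_map]
  rw [PySem.List.max?_id_cons]
  rw [show ((fun j : Nat => (1:Int) + (j:Int)) ∘ Nat.succ) = (fun j : Nat => (2:Int) + (j:Int)) from by
    funext j; simp; ring]
  rw [pvFoldlMaxRange rest.length 2 (1 + ((0:Nat) : Int))]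
  rcases Nat.eq_zero_or_pos rest.length with h0 | h0
  · simp [h0]
  · have h1 : rest.length ≠ 0 := h0.ne'
    simp only [h1, if_false]
    congr 1
    push_cast
    omega

theorem pvNumberFrom_append (xs ys : List (List (String × Int))) (s : Int) :
    pvNumberFrom s (xs ++ ys) = pvNumberFrom s xs ++ pvNumberFrom (s + xs.length) ys := by
  simp [pvNumberFrom, PySem.List.enumerate_append]

theorem pvNumberFrom_length (xs : List (List (String × Int))) (s : Int) :
    (pvNumberFrom s xs).length = xs.length := by
  simp [pvNumberFrom, PySem.List.length_enumerate]

theorem pv_main_aux (raw : List (List (String × Int))) (k : Nat) :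
    (List.range k).foldl
      (fun duplicated_data _ =>
        let id_offset : Int :=
          if duplicated_data.isEmpty then 1
          else ((PySem.List.max? (duplicated_data.map pvIdOf) (fun x => x)).getD 0) + 1
        duplicated_data ++ pvAssignA raw id_offset) []
    = pvNumberFrom 1 ((List.range k).foldl (fun acc _ => acc ++ raw) []) := by
  induction k with
  | zero => simp [pvNumberFrom, PySem.List.enumerate_nil]
  | succ m ih =>
    rw [List.range_succ, List.foldl_append, List.foldl_append, ih]
    simp only [List.foldl_cons, List.foldl_nil]
    set R := (List.range m).foldl (fun acc _ => acc ++ raw) [] with hR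
    rcases eq_or_ne R [] with h | h
    · simp [h, pvNumberFrom, PySem.List.enumerate_nil, pvAssignA_eq_numberFrom]
    · have hne : pvNumberFrom 1 R ≠ [] := by
        intro hc
        have := pvNumberFrom_length R 1
        rw [hc] at this
        exact h (List.eq_nil_of_length_eq_zero this.symm)
      rw [if_neg (by simpa [List.isEmpty_iff] using hne)]
      rw [pvMaxIds R h]
      rw [pvAssignA_eq_numberFrom, pvNumberFrom_append, Int.add_comm 1]
      norm_num

-- ===== VERDICT (by name: the statement is the Claim_ definition above) =====
theorem duplicate_raw_data_spec : Claim_equal_duplicate_raw_data := by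
  intro raw_data num_duplicates _
  show duplicate_raw_data raw_data num_duplicates = duplicate_raw_data_alt raw_data num_duplicates
  rw [duplicate_raw_data, duplicate_raw_data_alt]
  exact pv_main_aux raw_data num_duplicates.toNat
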